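-- pv_equiv track=rewrite | github.com/aule83-glitch/meteo-cap | backend/app/services/pdf_generator.py | _area_summary
-- ===== SOURCE A (Python) =====
-- def _area_summary(counties: list) -> tuple:
--     """Zwraca (opis zasięgu, dict województwo→liczba_powiatów)."""
--     if not counties:
--         return "Brak danych", {}
--     voiv_groups: dict = {}
--     for c in counties:
--         vn = c.get("voiv_name", "Nieznane")
--         voiv_groups.setdefault(vn, []).append(c.get("name", ""))
--     if len(voiv_groups) >= 14:
--         desc = "Cała Polska"
--     elif len(voiv_groups) == 1:
--         vn, names = list(voiv_groups.items())[0]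
--         desc = f"Województwo {vn}"
--     else:
--         desc = f"{len(voiv_groups)} województw"
--     return desc, voiv_groups
-- ===== SOURCE B (Python) =====
-- def _group(counties: list) -> list:
--     """Recursive partition grouping: peel off the first voivodeship, recurse on the rest."""
--     if not counties:
--         return []
--     vn = counties[0].get("voiv_name", "Nieznane")
--     same = [c.get("name", "") for c in counties if c.get("voiv_name", "Nieznane") == vn]
--     rest = [c for c in counties if c.get("voiv_name", "Nieznane") != vn]
--     return [(vn, same)] + _group(rest)
--
--
-- def _area_summary(counties: list) -> tuple:
--     """Zwraca (opis zasięgu, dict województwo→liczba_powiatów)."""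
--     if not counties:
--         return "Brak danych", {}
--     groups = _group(counties)
--     n = len(groups)
--     if n >= 14:
--         desc = "Cała Polska"
--     elif n == 1:
--         desc = f"Województwo {groups[0][0]}"
--     else:
--         desc = f"{n} województw"
--     return desc, dict(groups)
-- ===== Notes on version B (the rewrite author's own statement) =====
-- stated objective: alternative
-- what changed: Replaces A's single-pass setdefault-append dict accumulation with a recursive partition: peel off the first county's voivodeship, collect that group's names with one filtering pass, recurse on the counties of the remaining voivodeships, then build the dict from the group list.
import Mathlib
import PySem

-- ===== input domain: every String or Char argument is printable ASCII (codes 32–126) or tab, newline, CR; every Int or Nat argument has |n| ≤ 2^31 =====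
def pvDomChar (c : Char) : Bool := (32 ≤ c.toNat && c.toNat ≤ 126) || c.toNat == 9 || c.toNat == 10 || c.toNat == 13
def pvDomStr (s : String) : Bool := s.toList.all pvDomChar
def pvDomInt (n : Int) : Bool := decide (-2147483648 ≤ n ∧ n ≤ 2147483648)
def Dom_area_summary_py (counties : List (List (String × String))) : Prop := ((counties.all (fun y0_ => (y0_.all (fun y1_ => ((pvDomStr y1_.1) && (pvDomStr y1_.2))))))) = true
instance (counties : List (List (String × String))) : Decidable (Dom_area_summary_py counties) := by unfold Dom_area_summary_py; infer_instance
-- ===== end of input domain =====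

-- B replaces A's single-pass setdefault accumulation by a recursive partition grouping
-- (peel off the first voivodeship, filter its names, recurse on the rest) — alternative decomposition, same results.


-- ===== PORT A =====
-- c.get("voiv_name", "Nieznane") / c.get("name", "") on the county dict
def pvVoiv (c : List (String × String)) : String := (PySem.Dict.mk c).getD "voiv_name" "Nieznane"
def pvName (c : List (String × String)) : String := (PySem.Dict.mk c).getD "name" ""

def area_summary_py (counties : List (List (String × String))) : String × (List (String × List String)) :=
  if counties = [] then ("Brak danych", [])
  else
    -- voiv_groups.setdefault(vn, []).append(nm)  ==  voiv_groups[vn] = voiv_groups.get(vn, []) + [nm]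
    let voiv_groups : PySem.Dict String (List String) :=
      counties.foldl (fun d c => d.modify (pvVoiv c) [] (· ++ [pvName c])) PySem.Dict.empty
    let desc : String :=
      if 14 ≤ voiv_groups.size then "Cała Polska"
      else if voiv_groups.size = 1 then
        "Województwo " ++ (voiv_groups.items.headD ("", [])).1
      else PySem.Int.toStr (voiv_groups.size : Int) ++ " województw"
    (desc, voiv_groups.items)

-- ===== PORT B =====
-- _group: peel off the first county's voivodeship, build its name list by filtering,
-- recurse on the counties whose voivodeship differs.
def pvGroup : List (List (String × String)) → List (String × List String)
  | [] => []
  | c :: t =>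
    let vn := pvVoiv c
    (vn, ((c :: t).filter (fun x => pvVoiv x == vn)).map pvName)
      :: pvGroup ((c :: t).filter (fun x => !(pvVoiv x == vn)))
  termination_by l => l.length
  decreasing_by
    simp only [List.filter_cons, beq_self_eq_true, Bool.not_true]
    simp only [Bool.false_eq_true, if_false, List.length_cons]
    exact Nat.lt_succ_of_le (List.length_filter_le _ _)

def area_summary_py_alt (counties : List (List (String × String))) : String × (List (String × List String)) :=
  if counties = [] then ("Brak danych", [])
  else
    let groups := pvGroup counties
    let n := groups.length
    let desc : String :=
      if 14 ≤ n then "Cała Polska"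
      else if n = 1 then "Województwo " ++ (groups.headD ("", [])).1
      else PySem.Int.toStr (n : Int) ++ " województw"
    (desc, groups)

-- ===== PRECONDITION & SPEC =====
def Spec_area_summary_py (counties : List (List (String × String))) (out : String × (List (String × List String))) : Prop := out = area_summary_py_alt counties
instance (counties : List (List (String × String))) (out : String × (List (String × List String))) : Decidable (Spec_area_summary_py counties out) := by unfold Spec_area_summary_py; infer_instance

-- ===== CLAIM (what is proved, stated in full; the proofs are below) =====
def Claim_equal_area_summary_py : Prop := ∀ (counties : List (List (String × String))), Dom_area_summary_py counties → Spec_area_summary_py counties (area_summary_py counties)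

-- ===== LEMMAS AND PROOFS =====

-- foldl of Set.add starting from a set with distinguished head x (x not in the tail s):
-- x stays in front, tail accumulates the non-x elements.
theorem pv_foldl_add_cons {α : Type} [DecidableEq α] (ys : List α) (x : α) :
    ∀ (s : List α), x ∉ s →
      ys.foldl PySem.Set.add (x :: s) = x :: (ys.filter (fun y => y ≠ x)).foldl PySem.Set.add s := by
  induction ys with
  | nil => intro s _; simp
  | cons y ys ih =>
    intro s hx
    by_cases hyx : y = x
    · subst hyx
      have : PySem.Set.add (y :: s) y = y :: s := by
        simp [PySem.Set.add, PySem.Set.contains]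
      simp only [List.foldl_cons, this, List.filter_cons]
      simp [ih s hx]
    · have h1 : PySem.Set.add (x :: s) y = x :: PySem.Set.add s y := by
        by_cases hys : y ∈ s <;>
          simp [PySem.Set.add, PySem.Set.contains, hyx, hys]
      have h2 : x ∉ PySem.Set.add s y := by
        by_cases hys : y ∈ s <;>
          simp [PySem.Set.add, hys, hx, Ne.symm hyx]
      simp only [List.foldl_cons, h1, List.filter_cons]
      simp [hyx, ih _ h2]

-- dedup (a :: ys) = a :: dedup (ys with a removed)
theorem pv_dedup_cons {α : Type} [DecidableEq α] (a : α) (ys : List α) :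
    PySem.List.dedup (a :: ys) = a :: PySem.List.dedup (ys.filter (fun y => y ≠ a)) := by
  have h : ∀ (l : List α), PySem.List.dedup l = l.foldl PySem.Set.add [] := by
    intro l; simp [PySem.List.dedup_eq_ofList, PySem.Set.ofList_eq_foldl]
  rw [h, h]
  have : PySem.Set.add ([] : List α) a = [a] := by simp [PySem.Set.add, PySem.Set.contains]
  simp only [List.foldl_cons, this]
  exact pv_foldl_add_cons ys a [] (by simp)

-- B's recursive grouping, characterised the same way as A's dict items.
theorem pv_group_eq (counties : List (List (String × String))) :
    pvGroup counties
      = (PySem.List.dedup (counties.map pvVoiv)).map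
          (fun vn => (vn, (counties.filter (fun c => pvVoiv c == vn)).map pvName)) := by
  induction counties using pvGroup.induct with
  | case1 => simp [pvGroup]
  | case2 c t vn0 ih =>
    have hrest : (c :: t).filter (fun x => !(pvVoiv x == pvVoiv c))
        = t.filter (fun x => !(pvVoiv x == pvVoiv c)) := by
      simp
    have ih2 : pvGroup ((c :: t).filter (fun x => !(pvVoiv x == pvVoiv c)))
        = (PySem.List.dedup (((c :: t).filter (fun x => !(pvVoiv x == pvVoiv c))).map pvVoiv)).map
            (fun vn => (vn, (((c :: t).filter (fun x => !(pvVoiv x == pvVoiv c))).filter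
              (fun c => pvVoiv c == vn)).map pvName)) := ih
    rw [hrest] at ih2
    have hfm : (t.map pvVoiv).filter (fun y => y ≠ pvVoiv c)
        = (t.filter (fun x => !(pvVoiv x == pvVoiv c))).map pvVoiv := by
      rw [List.filter_map]
      have : t.filter ((fun y => decide (y ≠ pvVoiv c)) ∘ pvVoiv)
          = t.filter (fun x => !(pvVoiv x == pvVoiv c)) := by
        apply List.filter_congr; intro x _
        by_cases h : pvVoiv x = pvVoiv c <;> simp [Function.comp, h]
      rw [this]
    have hded : PySem.List.dedup ((c :: t).map pvVoiv)
        = pvVoiv c :: PySem.List.dedup ((t.filter (fun x => !(pvVoiv x == pvVoiv c))).map pvVoiv) := by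
      rw [List.map_cons, pv_dedup_cons, hfm]
    rw [pvGroup, hded, List.map_cons]
    congr 1
    rw [hrest, ih2]
    apply List.map_congr_left
    intro vn hvn
    have hvnne : vn ≠ pvVoiv c := by
      have hm := (PySem.List.mem_dedup _ _).1 hvn
      simp only [List.mem_map] at hm
      obtain ⟨x, hx, hxe⟩ := hm
      rw [List.mem_filter] at hx
      intro h; rw [h] at hxe; simp [hxe] at hx
    have hfc : (c :: t).filter (fun x => pvVoiv x == vn)
        = (t.filter (fun x => !(pvVoiv x == pvVoiv c))).filter (fun x => pvVoiv x == vn) := by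
      rw [List.filter_filter, List.filter_cons]
      have hce : (pvVoiv c == vn) = false := by simp [Ne.symm hvnne]
      simp only [hce, Bool.false_eq_true, if_false]
      apply List.filter_congr
      intro x _
      by_cases h : pvVoiv x = vn <;> simp [h, hvnne]
    rw [hfc]

-- A's accumulation dict, characterised: its items list IS the grouped list.
theorem pv_items_eq (counties : List (List (String × String))) :
    (counties.foldl (fun d c => d.modify (pvVoiv c) [] (· ++ [pvName c])) PySem.Dict.empty).items
      = (PySem.List.dedup (counties.map pvVoiv)).map
          (fun vn => (vn, (counties.filter (fun c => pvVoiv c == vn)).map pvName)) := by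
  set g := counties.foldl (fun d c => d.modify (pvVoiv c) [] (· ++ [pvName c])) PySem.Dict.empty with hg
  have hfold : g = (counties.map (fun c => (pvVoiv c, pvName c))).foldl
      (fun d p => d.modify p.1 [] (· ++ [p.2])) PySem.Dict.empty := by
    rw [hg, List.foldl_map]
  have hnd : g.keys.Nodup := by
    rw [hfold]
    exact PySem.Dict.nodup_keys_foldl_modify_key _ _ ([] : List String)
      (fun _ (p : String × String) xs => xs ++ [p.2]) _ PySem.Dict.nodup_keys_empty
  have hkeys : g.keys = PySem.List.dedup (counties.map pvVoiv) := by
    rw [hg]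
    have := PySem.Dict.keys_foldl_modify_key (l := counties) (key := pvVoiv)
      (d0 := ([] : List String)) (f := fun _ c xs => xs ++ [pvName c]) (d := PySem.Dict.empty)
    rw [this, PySem.Dict.keys_empty]
    have h2 : ∀ (l : List String), PySem.Set.update [] l = PySem.List.dedup l := by
      intro l; simp [pysem]
    exact h2 _
  rw [PySem.Dict.items_eq_map_keys g hnd ([] : List String), hkeys]
  apply List.map_congr_left
  intro vn _
  congr 1
  rw [hfold, PySem.Dict.getD_foldl_modify_append]
  simp [pysem, List.filter_map, Function.comp_def]

theorem area_summary_py_spec_aux (counties : List (List (String × String))) :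
    area_summary_py counties = area_summary_py_alt counties := by
  by_cases h : counties = []
  · simp [area_summary_py, area_summary_py_alt, h]
  · have hi := pv_items_eq counties
    have hg := pv_group_eq counties
    simp only [area_summary_py, area_summary_py_alt, if_neg h, hi, hg, PySem.Dict.size,
      List.length_map]

-- ===== VERDICT (by name: the statement is the Claim_ definition above) =====
theorem area_summary_py_spec : Claim_equal_area_summary_py := by
  intro counties _
  unfold Spec_area_summary_py
  exact area_summary_py_spec_aux counties
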